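-- pv_equiv track=rewrite | github.com/natcz/scrabble_multiplayer | Hint.py | similarLetters
-- ===== SOURCE A (Python) =====
-- from collections import defaultdict as dd
--
-- def similarLetters(word1, word2):
--     """
--             This function calculates number
--             of letters that are in both word1 and word2.
--             It creates a itertools default dictionary
--             for both word1 and word2
--             where key: letter
--             val: number of instances of letters
--             and then counts how many letters
--             are the same in both words.
--             :param word1:(string) first word
--             :param word2:(string) second word
--             :return: int - number of common letters
--     """
--     w1 = dd(int)
--     w2 = dd(int)
--     counter = 0  # creating a deafault dict for each word where
--     for letter in word1:  # key: letter val: number of instances of letters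
--         w1[letter] += 1
--     for letter in word2:
--         w2[letter] += 1
--     for key, val in w1.items():
--         # counting how many letters are the same in word1 and word2
--         counter += min(val, w2[key])
--     return counter
-- ===== SOURCE B (Python) =====
-- def similarLetters(word1, word2):
--     remaining = {}
--     for ch in word1:
--         remaining[ch] = remaining.get(ch, 0) + 1
--     matched = 0
--     for ch in word2:
--         if remaining.get(ch, 0) > 0:
--             remaining[ch] = remaining[ch] - 1
--             matched += 1
--     return matched
-- ===== Notes on version B (the rewrite author's own statement) =====
-- stated objective: alternative
-- what changed: Instead of building two frequency dicts and summing per-letter minimums over the first dict's items, B builds one consumable frequency table for word1 and streams once over word2, consuming a count and incrementing the result on each match.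
import Mathlib
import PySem

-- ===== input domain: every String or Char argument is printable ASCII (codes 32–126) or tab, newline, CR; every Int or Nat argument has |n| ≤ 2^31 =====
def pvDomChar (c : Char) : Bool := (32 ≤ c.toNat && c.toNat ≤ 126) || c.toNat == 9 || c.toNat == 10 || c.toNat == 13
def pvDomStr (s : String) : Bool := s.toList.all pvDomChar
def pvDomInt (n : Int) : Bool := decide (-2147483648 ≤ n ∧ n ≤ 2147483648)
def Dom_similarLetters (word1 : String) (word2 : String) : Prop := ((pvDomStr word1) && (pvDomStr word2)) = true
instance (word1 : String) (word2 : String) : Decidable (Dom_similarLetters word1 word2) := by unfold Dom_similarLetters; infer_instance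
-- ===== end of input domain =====

-- B replaces A's two frequency dicts + per-letter minimum sum by one consumable
-- table for word1 and a single streaming consume-on-match pass over word2 (alternative decomposition).

-- ===== PORT A =====
-- A's defaultdict lookup w2[key] also inserts key into w2, but w2 is never read
-- afterwards, so reading it as getD _ 0 is exact for the return value.
def similarLetters (word1 : String) (word2 : String) : Int :=
  let w1 := word1.toList.foldl (fun d c => d.modify c 0 (· + 1)) PySem.Dict.empty
  let w2 := word2.toList.foldl (fun d c => d.modify c 0 (· + 1)) PySem.Dict.empty
  w1.items.foldl (fun counter kv => counter + min kv.2 (w2.getD kv.1 0)) 0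

-- ===== PORT B =====
def similarLetters_alt (word1 : String) (word2 : String) : Int :=
  let remaining := word1.toList.foldl (fun d c => d.insert c (d.getD c 0 + 1)) (PySem.Dict.empty : PySem.Dict Char Int)
  (word2.toList.foldl
    (fun st c => if st.1.getD c 0 > 0 then (st.1.insert c (st.1.getD c 0 - 1), st.2 + 1) else st)
    (remaining, (0 : Int))).2

-- ===== PRECONDITION & SPEC =====
def Spec_similarLetters (word1 : String) (word2 : String) (out : Int) : Prop := out = similarLetters_alt word1 word2
instance (word1 : String) (word2 : String) (out : Int) : Decidable (Spec_similarLetters word1 word2 out) := by unfold Spec_similarLetters; infer_instance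

-- ===== CLAIM (what is proved, stated in full; the proofs are below) =====
def Claim_equal_similarLetters : Prop := ∀ (word1 : String) (word2 : String), Dom_similarLetters word1 word2 → Spec_similarLetters word1 word2 (similarLetters word1 word2)

-- ===== LEMMAS AND PROOFS =====

-- B's streaming pass: with a table holding the counts of l1, consuming along l2
-- counts exactly the multiset intersection of l1 and l2.
lemma consume_eq (l2 : List Char) (l1 : List Char) (d : PySem.Dict Char Int) (acc : Int)
    (h : ∀ v, d.getD v 0 = (l1.count v : Int)) :
    (l2.foldl
      (fun st c => if st.1.getD c 0 > 0 then (st.1.insert c (st.1.getD c 0 - 1), st.2 + 1) else st)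
      (d, acc)).2 = acc + (((l1 : Multiset Char) ∩ (l2 : Multiset Char)).card : Int) := by
  induction l2 generalizing l1 d acc with
  | nil => simp
  | cons c rest ih =>
    have hcons : ((c :: rest : List Char) : Multiset Char) = c ::ₘ (rest : Multiset Char) := by simp
    by_cases hc : c ∈ l1
    · have hpos : d.getD c 0 > 0 := by
        rw [h c]; exact_mod_cast List.count_pos_iff.mpr hc
      have hcnt : 1 ≤ l1.count c := List.count_pos_iff.mpr hc
      have h' : ∀ v, (d.insert c (d.getD c 0 - 1)).getD v 0 = ((l1.erase c).count v : Int) := by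
        intro v
        rw [PySem.Dict.getD_insert]
        by_cases hv : v = c
        · rw [if_pos hv, hv, List.count_erase_self, h]
          omega
        · rw [if_neg hv, h v, List.count_erase_of_ne hv]
      have hcard : ((l1 : Multiset Char) ∩ ((c :: rest : List Char) : Multiset Char)).card
          = ((((l1.erase c : List Char) : Multiset Char) ∩ (rest : Multiset Char)).card) + 1 := by
        rw [Multiset.inter_comm, hcons, Multiset.cons_inter_of_pos _ hc, Multiset.card_cons,
            Multiset.inter_comm]
        simp [Multiset.coe_erase]
      have hstep : (if (d, acc).1.getD c 0 > 0
            then ((d, acc).1.insert c ((d, acc).1.getD c 0 - 1), (d, acc).2 + 1) else (d, acc))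
            = (d.insert c (d.getD c 0 - 1), acc + 1) := by
        simp [hpos]
      rw [List.foldl_cons, hstep, ih (l1.erase c) _ _ h', hcard]
      push_cast; ring
    · have hneg : ¬ d.getD c 0 > 0 := by
        rw [h c]
        have h0 : l1.count c = 0 := List.count_eq_zero.mpr hc
        simp [h0]
      have hcard : ((l1 : Multiset Char) ∩ ((c :: rest : List Char) : Multiset Char)).card
          = ((l1 : Multiset Char) ∩ (rest : Multiset Char)).card := by
        rw [Multiset.inter_comm, hcons, Multiset.cons_inter_of_neg _ hc, Multiset.inter_comm]
      have hstep : (if (d, acc).1.getD c 0 > 0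
            then ((d, acc).1.insert c ((d, acc).1.getD c 0 - 1), (d, acc).2 + 1) else (d, acc))
            = (d, acc) := by
        simp [hneg]
      rw [List.foldl_cons, hstep, ih l1 d acc h, hcard]

-- A's per-letter minimum sum over word1's distinct letters is the same intersection card.
lemma sum_min_eq_card_inter (l1 l2 : List Char) :
    ((PySem.Set.ofList l1).map
      (fun k => min ((l1.count k : Int)) ((l2.count k : Int)))).sum
    = (((l1 : Multiset Char) ∩ (l2 : Multiset Char)).card : Int) := by
  have hnd : (PySem.Set.ofList l1).Nodup := by apply PySem.Set.nodup_ofList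
  have hperm : List.Perm (PySem.Set.ofList l1) l1.dedup := by
    rw [List.perm_ext_iff_of_nodup hnd l1.nodup_dedup]
    intro a
    simp [List.mem_dedup, PySem.Set.mem_ofList]
  have hfs : l1.dedup.toFinset = l1.toFinset := by ext a; simp
  rw [List.Perm.sum_eq (hperm.map _), ← List.sum_toFinset _ l1.nodup_dedup, hfs]
  have hsub : ((l1 : Multiset Char) ∩ (l2 : Multiset Char)).toFinset ⊆ l1.toFinset := by
    intro a ha
    simp only [Multiset.mem_toFinset, Multiset.mem_inter, Multiset.mem_coe] at ha
    simpa using ha.1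
  have hcard : (((l1 : Multiset Char) ∩ (l2 : Multiset Char)).card : Int)
      = ∑ k ∈ ((l1 : Multiset Char) ∩ (l2 : Multiset Char)).toFinset,
          ((((l1 : Multiset Char) ∩ (l2 : Multiset Char)).count k : Int)) := by
    rw [← Multiset.toFinset_sum_count_eq]
    push_cast; rfl
  rw [hcard, Finset.sum_subset hsub]
  · apply Finset.sum_congr rfl
    intro k _
    rw [Multiset.count_inter]
    push_cast
    simp
  · intro k _ hk
    simp only [Multiset.mem_toFinset] at hk
    rw [Multiset.count_inter]
    have := Multiset.count_eq_zero.mpr hk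
    rw [Multiset.count_inter] at this
    omega

lemma similarLetters_eq_card (w1 w2 : String) :
    similarLetters w1 w2
      = (((w1.toList : Multiset Char) ∩ (w2.toList : Multiset Char)).card : Int) := by
  simp only [similarLetters]
  rw [show (w1.toList.foldl (fun d c => d.modify c 0 (· + 1)) PySem.Dict.empty)
        = PySem.Dict.counter w1.toList from rfl,
      show (w2.toList.foldl (fun d c => d.modify c 0 (· + 1)) PySem.Dict.empty)
        = PySem.Dict.counter w2.toList from rfl]
  rw [PySem.List.foldl_add (g := fun kv : Char × Int =>
        min kv.2 ((PySem.Dict.counter w2.toList).getD kv.1 0))]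
  rw [PySem.Dict.items_counter, List.map_map]
  rw [← sum_min_eq_card_inter w1.toList w2.toList]
  simp only [Function.comp_def, PySem.Dict.getD_counter, zero_add]

lemma similarLetters_alt_eq_card (w1 w2 : String) :
    similarLetters_alt w1 w2
      = (((w1.toList : Multiset Char) ∩ (w2.toList : Multiset Char)).card : Int) := by
  simp only [similarLetters_alt]
  have hd : ∀ v, (w1.toList.foldl (fun d c => d.insert c (d.getD c 0 + 1)) (PySem.Dict.empty : PySem.Dict Char Int)).getD v 0
      = (w1.toList.count v : Int) := by
    intro v
    rw [PySem.Dict.foldl_insert_getD_add_one_eq_counter w1.toList, PySem.Dict.getD_counter]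
  exact (consume_eq w2.toList w1.toList _ 0 hd).trans (by ring)

-- ===== VERDICT (by name: the statement is the Claim_ definition above) =====
theorem similarLetters_spec : Claim_equal_similarLetters := by
  intro w1 w2 _
  unfold Spec_similarLetters
  rw [similarLetters_eq_card, similarLetters_alt_eq_card]
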